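-- pv_equiv track=rewrite | github.com/PavelElenov/Python_Advanced | File Handling - Exercise/line_numbers.py | count
-- ===== SOURCE A (Python) =====
-- def count(line):
--     words = line.split()
--     letters_count = 0
--     punctuation_mark_count = 0
--     for word in words:
--         for letter in word:
--             if letter.isalpha():
--                 letters_count += 1
--             else:
--                 punctuation_mark_count += 1
--     return letters_count, punctuation_mark_count
-- ===== SOURCE B (Python) =====
-- def count(line):
--     distinct = set(line)
--     letters = sum(line.count(c) for c in distinct if c.isalpha())
--     punct = sum(line.count(c) for c in distinct if not c.isalpha() and not c.isspace())
--     return letters, punct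
-- ===== Notes on version B (the rewrite author's own statement) =====
-- stated objective: alternative
-- what changed: Instead of splitting into words and classifying each character in nested loops with two running counters, B builds the set of distinct characters once and sums str.count occurrence counts per distinct character class (alphabetic vs non-alpha non-space), never iterating the split words at all.
import Mathlib
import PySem

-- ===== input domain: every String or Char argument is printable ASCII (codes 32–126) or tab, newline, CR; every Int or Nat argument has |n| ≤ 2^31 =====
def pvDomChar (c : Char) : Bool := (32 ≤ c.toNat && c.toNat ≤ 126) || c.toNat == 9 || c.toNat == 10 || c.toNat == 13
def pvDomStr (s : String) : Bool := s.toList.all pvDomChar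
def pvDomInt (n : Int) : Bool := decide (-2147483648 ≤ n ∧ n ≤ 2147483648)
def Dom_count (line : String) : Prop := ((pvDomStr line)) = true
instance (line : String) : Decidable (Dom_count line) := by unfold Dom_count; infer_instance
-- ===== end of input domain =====

-- B counts per distinct character with str.count, summing the alphabetic and non-alpha/non-space classes,
-- instead of A's nested word/letter loops with two running counters (objective: alternative).

-- ===== PORT A =====
def count (line : String) : Int × Int :=
  let words := PySem.Str.split₀ line
  words.foldl (fun st w =>
    w.toList.foldl (fun st c =>
      if PySem.Chars.isalpha c then (st.1 + 1, st.2) else (st.1, st.2 + 1)) st) (0, 0)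

-- ===== PORT B =====
def count_alt (line : String) : Int × Int :=
  let distinct := PySem.Set.ofList line.toList
  let letters : Int :=
    ((distinct.filter (fun c => PySem.Chars.isalpha c)).map
      (fun c => (PySem.Str.count line (String.ofList [c]) : Int))).sum
  let punct : Int :=
    ((distinct.filter (fun c => !PySem.Chars.isalpha c && !PySem.Chars.isspace c)).map
      (fun c => (PySem.Str.count line (String.ofList [c]) : Int))).sum
  (letters, punct)

-- ===== PRECONDITION & SPEC =====
def Spec_count (line : String) (out : Int × Int) : Prop := out = count_alt line
instance (line : String) (out : Int × Int) : Decidable (Spec_count line out) := by unfold Spec_count; infer_instance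

-- ===== CLAIM (what is proved, stated in full; the proofs are below) =====
def Claim_equal_count : Prop := ∀ (line : String), Dom_count line → Spec_count line (count line)

-- ===== LEMMAS AND PROOFS =====

-- str.count with a single-character needle is the character count
theorem pv_count_go_singleton (c : Char) (l : List Char) (fuel acc : Nat) (h : l.length ≤ fuel) :
    PySem.Chars.count.go [c] fuel l acc = acc + l.count c := by
  induction l generalizing fuel acc with
  | nil => cases fuel <;> simp [PySem.Chars.count.go]
  | cons x t ih =>
    cases fuel with
    | zero => simp at h
    | succ f =>
      have hf : t.length ≤ f := by simp only [List.length_cons] at h; omega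
      by_cases hx : x = c
      · subst hx
        have hpre : ([x].isPrefixOf (x :: t)) = true := by simp [List.isPrefixOf]
        have hgo : PySem.Chars.count.go [x] (f + 1) (x :: t) acc
            = PySem.Chars.count.go [x] f t (acc + 1) := by
          simp [PySem.Chars.count.go, hpre]
        rw [hgo, ih f (acc + 1) hf, List.count_cons]
        simp
        omega
      · have hpre : ([c].isPrefixOf (x :: t)) = false := by
          simp [List.isPrefixOf, Ne.symm hx]
        have hgo : PySem.Chars.count.go [c] (f + 1) (x :: t) acc
            = PySem.Chars.count.go [c] f t acc := by
          simp [PySem.Chars.count.go, hpre]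
        rw [hgo, ih f acc hf, List.count_cons]
        simp [hx]

theorem pv_count_singleton (c : Char) (l : List Char) :
    PySem.Chars.count l [c] = l.count c := by
  simp [PySem.Chars.count, pv_count_go_singleton c l l.length 0 le_rfl]

-- the characters of the split words are exactly the non-whitespace characters, in order
theorem pv_split₀_go_flatten (rest cur : List Char) (acc : List (List Char)) :
    (PySem.Chars.split₀.go rest cur acc).flatten
      = acc.reverse.flatten ++ cur.reverse ++ rest.filter (fun c => !PySem.Chars.isspace c) := by
  induction rest generalizing cur acc with
  | nil =>
    by_cases hc : cur.isEmpty <;>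
      simp_all [PySem.Chars.split₀.go, List.isEmpty_iff]
  | cons c rest ih =>
    by_cases hs : PySem.Chars.isspace c
    · by_cases hc : cur.isEmpty <;>
        simp_all [PySem.Chars.split₀.go, List.isEmpty_iff]
    · simp [PySem.Chars.split₀.go, hs, ih]

-- alphabetic characters are never whitespace
theorem pv_alpha_not_space (c : Char) (h : PySem.Chars.isalpha c) :
    PySem.Chars.isspace c = false := by
  unfold PySem.Chars.isalpha PySem.Chars.isupper PySem.Chars.islower at h
  unfold PySem.Chars.isspace
  simp only [Bool.or_eq_true, Bool.and_eq_true, decide_eq_true_eq] at h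
  simp only [Bool.or_eq_false_iff, Bool.and_eq_false_iff, decide_eq_false_iff_not]
  rcases h with ⟨h1, h2⟩ | ⟨h1, h2⟩
  · have e1 : (65 : Nat) ≤ c.toNat := h1
    have e2 : c.toNat ≤ 90 := h2
    omega
  · have e1 : (97 : Nat) ≤ c.toNat := h1
    have e2 : c.toNat ≤ 122 := h2
    omega

-- A's inner/outer fold counts alpha and non-alpha characters of the flattened words
theorem pv_fold_pair (cs : List Char) (a b : Int) :
    cs.foldl (fun st c =>
      if PySem.Chars.isalpha c then (st.1 + 1, st.2) else (st.1, st.2 + 1)) (a, b)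
      = (a + (cs.countP (fun c => PySem.Chars.isalpha c) : Int),
         b + (cs.countP (fun c => !PySem.Chars.isalpha c) : Int)) := by
  induction cs generalizing a b with
  | nil => simp
  | cons c cs ih =>
    by_cases h : PySem.Chars.isalpha c <;>
      simp [h, ih] <;> omega

-- splitting a countP over membership in c :: d when c is not in d
theorem pv_countP_split (cs : List Char) (p : Char → Bool) (c : Char) (d : List Char)
    (hc : c ∉ d) :
    cs.countP (fun x => p x && decide (x ∈ c :: d))
      = cs.countP (fun x => p x && x == c) + cs.countP (fun x => p x && decide (x ∈ d)) := by
  induction cs with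
  | nil => simp
  | cons x cs ih =>
    simp only [List.countP_cons, ih]
    by_cases hp : p x
    · by_cases hx : x = c
      · subst hx
        simp [hp, hc]
        omega
      · by_cases hd : x ∈ d <;> simp [hp, hx, hd, List.mem_cons] <;> omega
    · simp [hp]

-- a countP restricted to a single character is that character's count (or 0)
theorem pv_countP_single (cs : List Char) (p : Char → Bool) (c : Char) :
    cs.countP (fun x => p x && x == c) = if p c then cs.count c else 0 := by
  by_cases hp : p c
  · rw [if_pos hp, List.count]
    apply List.countP_congr
    intro x _
    by_cases hx : x = c
    · subst hx; simp [hp]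
    · simp [hx]
  · rw [if_neg hp]
    rw [List.countP_eq_zero]
    intro x _
    by_cases hx : x = c
    · subst hx; simp [hp]
    · simp [hx]

-- summing per-distinct-character counts over a nodup list gives a countP
theorem pv_sum_counts (p : Char → Bool) (cs : List Char) (d : List Char) (hnd : d.Nodup) :
    ((d.filter p).map (fun c => (cs.count c : Int))).sum
      = (cs.countP (fun x => p x && x ∈ d) : Int) := by
  induction d with
  | nil => simp
  | cons c d ih =>
    simp only [List.nodup_cons] at hnd
    rw [pv_countP_split cs p c d hnd.1]
    rw [List.filter_cons]
    by_cases hp : p c <;>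
      simp only [hp, if_true, if_false, Bool.false_eq_true, List.map_cons, List.sum_cons,
        ih hnd.2, pv_countP_single, Nat.zero_add] <;> push_cast <;> ring

-- ===== VERDICT (by name: the statement is the Claim_ definition above) =====
theorem count_spec : Claim_equal_count := by
  intro line _
  show count line = count_alt line
  unfold count count_alt
  simp only
  set cs := line.toList with hcs
  -- A side: nested folds = one fold over the non-whitespace characters
  have hA : List.foldl
      (fun st w => w.toList.foldl (fun st c =>
        if PySem.Chars.isalpha c then (st.1 + 1, st.2) else (st.1, st.2 + 1)) st)
      ((0 : Int), (0 : Int)) (PySem.Str.split₀ line)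
      = (cs.filter (fun c => !PySem.Chars.isspace c)).foldl
        (fun st c => if PySem.Chars.isalpha c then (st.1 + 1, st.2) else (st.1, st.2 + 1))
        ((0 : Int), (0 : Int)) := by
    rw [← List.foldl_map (f := String.toList), ← List.foldl_flatten,
      PySem.Str.split₀_map_toList]
    rw [show ((PySem.Chars.split₀ cs).flatten = cs.filter (fun c => !PySem.Chars.isspace c))
      from by simpa using pv_split₀_go_flatten cs [] []]
  rw [hA, pv_fold_pair]
  -- B side: the two sums are countP over the distinct characters
  have hnd := PySem.Set.nodup_ofList cs
  have hb : ∀ c : Char, PySem.Str.count line (String.ofList [c]) = cs.count c := by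
    intro c
    simp [PySem.Str.count, String.toList_ofList, pv_count_singleton, ← hcs]
  have hmap : ∀ p : Char → Bool,
      (((PySem.Set.ofList cs).filter p).map
        (fun c => (PySem.Str.count line (String.ofList [c]) : Int))).sum
      = (cs.countP p : Int) := by
    intro p
    have h1 : (((PySem.Set.ofList cs).filter p).map
        (fun c => (PySem.Str.count line (String.ofList [c]) : Int)))
        = (((PySem.Set.ofList cs).filter p).map (fun c => (cs.count c : Int))) := by
      apply List.map_congr_left
      intro c _
      rw [hb c]
    rw [h1, pv_sum_counts p cs _ hnd]
    congr 1
    apply List.countP_congr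
    intro x hx
    have : x ∈ PySem.Set.ofList cs := (PySem.Set.mem_ofList cs x).mpr hx
    simp [this]
  rw [hmap, hmap]
  -- reconcile the predicates
  have e1 : (cs.filter (fun c => !PySem.Chars.isspace c)).countP
      (fun c => PySem.Chars.isalpha c) = cs.countP (fun c => PySem.Chars.isalpha c) := by
    rw [List.countP_filter]
    apply List.countP_congr
    intro x _
    by_cases hx : PySem.Chars.isalpha x
    · simp [hx, pv_alpha_not_space x hx]
    · simp [hx]
  have e2 : (cs.filter (fun c => !PySem.Chars.isspace c)).countP
      (fun c => !PySem.Chars.isalpha c)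
      = cs.countP (fun c => !PySem.Chars.isalpha c && !PySem.Chars.isspace c) := by
    rw [List.countP_filter]
  rw [e1, e2]
  simp
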